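-- pv_equiv track=rewrite | github.com/marcelodanieldm/PulseB2B | src/osint_lead_scorer.py | predict_hiring_window
-- ===== SOURCE A (Python) =====
-- from typing import List, Dict, Optional, Tuple
--
-- def predict_hiring_window(score: int, signals: List[str], article_date: str) -> str:
--     """
--     Predict hiring window based on score and signals.
--
--     Args:
--         score: Total heuristic score
--         signals: List of matched signals
--         article_date: Date of the article
--
--     Returns:
--         Predicted hiring window as string
--     """
--     # High urgency signals
--     urgent_signals = ['series_a', 'series_b', 'series_c', 'expansion', 'hiring']
--     has_urgent = any(signal.lstrip('+-') in urgent_signals for signal in signals)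
--
--     # Funding rounds typically trigger hiring within 1-3 months
--     if score >= 100 and has_urgent:
--         return "Next 1-2 months (High Priority)"
--     elif score >= 70 and has_urgent:
--         return "Next 2-3 months (High Potential)"
--     elif score >= 50:
--         return "Next 3-6 months (Medium Potential)"
--     elif score >= 20:
--         return "Next 6-12 months (Low-Medium Potential)"
--     elif score > 0:
--         return "Next 12+ months (Monitor)"
--     elif score == 0:
--         return "Insufficient data"
--     else:
--         return "Not recommended (Negative signals)"
-- ===== SOURCE B (Python) =====
-- URGENT = {'series_a', 'series_b', 'series_c', 'expansion', 'hiring'}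
--
-- # Score breakpoints and the label tier each one unlocks (tier 0 = no positive tier).
-- BOUNDS = [1, 20, 50, 70, 100]
-- LABELS = [
--     "",
--     "Next 12+ months (Monitor)",
--     "Next 6-12 months (Low-Medium Potential)",
--     "Next 3-6 months (Medium Potential)",
--     "Next 2-3 months (High Potential)",
--     "Next 1-2 months (High Priority)",
-- ]
--
-- def predict_hiring_window(score, signals, article_date):
--     has_urgent = not URGENT.isdisjoint(s.lstrip('+-') for s in signals)
--     # Without an urgent signal a score never unlocks the two top tiers,
--     # which start at 70: clamp the effective score below that boundary.
--     eff = score if has_urgent else min(score, 69)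
--     tier = sum(1 for t in BOUNDS if eff >= t)
--     if tier:
--         return LABELS[tier]
--     return "Insufficient data" if score == 0 else "Not recommended (Negative signals)"
-- ===== Notes on version B (the rewrite author's own statement) =====
-- stated objective: alternative
-- what changed: B computes urgency by set-disjointness over the stripped signals, then replaces the whole branch cascade by arithmetic: it clamps the score below 70 when no urgent signal exists, counts how many breakpoints [1,20,50,70,100] the effective score reaches, and indexes a label table with that count.
import Mathlib
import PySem

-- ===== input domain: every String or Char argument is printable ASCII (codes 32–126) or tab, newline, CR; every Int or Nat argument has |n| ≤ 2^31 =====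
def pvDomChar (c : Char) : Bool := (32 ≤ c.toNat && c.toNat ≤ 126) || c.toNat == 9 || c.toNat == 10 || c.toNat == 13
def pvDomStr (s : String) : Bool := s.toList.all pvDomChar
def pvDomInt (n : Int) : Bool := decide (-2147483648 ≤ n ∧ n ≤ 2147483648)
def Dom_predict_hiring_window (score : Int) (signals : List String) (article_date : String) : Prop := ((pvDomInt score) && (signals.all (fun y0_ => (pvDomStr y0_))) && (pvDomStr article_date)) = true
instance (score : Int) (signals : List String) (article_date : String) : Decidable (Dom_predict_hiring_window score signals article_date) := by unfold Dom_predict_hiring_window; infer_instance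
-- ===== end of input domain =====

-- B replaces A's if/elif cascade by clamp-then-count-breakpoints arithmetic over a label table (alternative decomposition; same cost).

-- ===== PORT A =====
-- s.lstrip('+-') ported by hand as dropWhile over the code points — exact: Python's
-- lstrip(chars) removes exactly the longest leading run of characters from the set.
def pvLstripPM (s : String) : String :=
  String.ofList (s.toList.dropWhile (fun c => c == '+' || c == '-'))

def predict_hiring_window (score : Int) (signals : List String) (article_date : String) : String :=
  let urgent_signals := ["series_a", "series_b", "series_c", "expansion", "hiring"]
  let has_urgent := signals.any (fun signal => urgent_signals.contains (pvLstripPM signal))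
  if score ≥ 100 ∧ has_urgent then "Next 1-2 months (High Priority)"
  else if score ≥ 70 ∧ has_urgent then "Next 2-3 months (High Potential)"
  else if score ≥ 50 then "Next 3-6 months (Medium Potential)"
  else if score ≥ 20 then "Next 6-12 months (Low-Medium Potential)"
  else if score > 0 then "Next 12+ months (Monitor)"
  else if score = 0 then "Insufficient data"
  else "Not recommended (Negative signals)"

-- ===== PORT B =====
def pvURGENT : PySem.Set String :=
  PySem.Set.ofList ["series_a", "series_b", "series_c", "expansion", "hiring"]

def pvBOUNDS : List Int := [1, 20, 50, 70, 100]

def pvLABELS : List String :=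
  [ "",
    "Next 12+ months (Monitor)",
    "Next 6-12 months (Low-Medium Potential)",
    "Next 3-6 months (Medium Potential)",
    "Next 2-3 months (High Potential)",
    "Next 1-2 months (High Priority)" ]

-- set.isdisjoint(iterable): no element of the iterable is a member of the set
def pvIsDisjoint (s : PySem.Set String) (xs : List String) : Bool :=
  !(xs.any s.contains)

def predict_hiring_window_alt (score : Int) (signals : List String) (article_date : String) : String :=
  let has_urgent := !(pvIsDisjoint pvURGENT (signals.map pvLstripPM))
  let eff := if has_urgent then score else min score 69
  let tier := pvBOUNDS.foldl (fun acc t => if eff ≥ t then acc + 1 else acc) 0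
  if tier ≠ 0 then (PySem.List.pyGet? pvLABELS tier).getD ""
  else if score = 0 then "Insufficient data" else "Not recommended (Negative signals)"

-- ===== PRECONDITION & SPEC =====
def Spec_predict_hiring_window (score : Int) (signals : List String) (article_date : String) (out : String) : Prop := out = predict_hiring_window_alt score signals article_date
instance (score : Int) (signals : List String) (article_date : String) (out : String) : Decidable (Spec_predict_hiring_window score signals article_date out) := by unfold Spec_predict_hiring_window; infer_instance

-- ===== CLAIM (what is proved, stated in full; the proofs are below) =====
def Claim_equal_predict_hiring_window : Prop := ∀ (score : Int) (signals : List String) (article_date : String), Dom_predict_hiring_window score signals article_date → Spec_predict_hiring_window score signals article_date (predict_hiring_window score signals article_date)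

-- ===== LEMMAS AND PROOFS =====
-- the two urgency computations agree
theorem pvUrgent_eq (signals : List String) :
    (!(pvIsDisjoint pvURGENT (signals.map pvLstripPM))) =
    signals.any (fun signal =>
      (["series_a", "series_b", "series_c", "expansion", "hiring"] : List String).contains (pvLstripPM signal)) := by
  have h : pvURGENT.contains =
      fun x => (["series_a", "series_b", "series_c", "expansion", "hiring"] : List String).contains x := by
    funext x; rfl
  simp only [pvIsDisjoint, Bool.not_not, List.any_map, h]
  rfl

-- the breakpoint count as a closed form
theorem pvTier_eq (eff : Int) :
    pvBOUNDS.foldl (fun acc t => if eff ≥ t then acc + 1 else acc) (0 : Int) =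
    (if eff ≥ 100 then (5 : Int) else if eff ≥ 70 then 4 else if eff ≥ 50 then 3
     else if eff ≥ 20 then 2 else if eff ≥ 1 then 1 else 0) := by
  simp only [pvBOUNDS, List.foldl]
  split_ifs <;> omega

-- A's cascade equals B's clamp-count-index tail, for any score and urgency flag
theorem pvKey (score : Int) (hu : Bool) :
    (if score ≥ 100 ∧ hu then "Next 1-2 months (High Priority)"
     else if score ≥ 70 ∧ hu then "Next 2-3 months (High Potential)"
     else if score ≥ 50 then "Next 3-6 months (Medium Potential)"
     else if score ≥ 20 then "Next 6-12 months (Low-Medium Potential)"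
     else if score > 0 then "Next 12+ months (Monitor)"
     else if score = 0 then "Insufficient data"
     else "Not recommended (Negative signals)") =
    (let eff := if hu then score else min score 69
     let tier := pvBOUNDS.foldl (fun acc t => if eff ≥ t then acc + 1 else acc) 0
     if tier ≠ 0 then (PySem.List.pyGet? pvLABELS tier).getD ""
     else if score = 0 then "Insufficient data"
     else "Not recommended (Negative signals)") := by
  show _ = (if pvBOUNDS.foldl (fun acc t => if (if hu then score else min score 69) ≥ t then acc + 1 else acc) 0 ≠ 0
      then (PySem.List.pyGet? pvLABELS (pvBOUNDS.foldl (fun acc t => if (if hu then score else min score 69) ≥ t then acc + 1 else acc) 0)).getD ""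
      else if score = 0 then "Insufficient data" else "Not recommended (Negative signals)")
  simp only [pvTier_eq]
  cases hu <;>
    simp only [Bool.false_eq_true, and_false, and_true, if_false, if_true] <;>
    split_ifs <;> first | rfl | omega

-- ===== VERDICT (by name: the statement is the Claim_ definition above) =====
theorem predict_hiring_window_spec : Claim_equal_predict_hiring_window := by
  intro score signals article_date _
  unfold Spec_predict_hiring_window predict_hiring_window predict_hiring_window_alt
  rw [pvUrgent_eq]
  exact pvKey score _
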